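-- pv_equiv track=rewrite | github.com/Ravencloned/samaira-ai | backend/financial/goals.py | detect_goal_from_text
-- ===== SOURCE A (Python) =====
-- from typing import Optional
--
-- def detect_goal_from_text(text: str) -> Optional[str]:
--     """Detect goal type from user's Hinglish text."""
--     text_lower = text.lower()
--
--     # Education keywords
--     if any(kw in text_lower for kw in ["padhai", "education", "college", "school", "bachhe", "bachha", "beta", "beti", "study"]):
--         if any(kw in text_lower for kw in ["beti", "daughter", "ladki"]):
--             return "child_education"  # Could be SSY eligible
--         return "child_education"
--
--     # Wedding keywords
--     if any(kw in text_lower for kw in ["shadi", "shaadi", "wedding", "marriage", "vivah"]):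
--         return "daughter_wedding"
--
--     # Home keywords
--     if any(kw in text_lower for kw in ["ghar", "home", "house", "flat", "apartment", "property", "down payment"]):
--         return "home_downpayment"
--
--     # Retirement keywords
--     if any(kw in text_lower for kw in ["retire", "retirement", "pension", "budhaapa", "old age"]):
--         return "retirement"
--
--     # Emergency keywords
--     if any(kw in text_lower for kw in ["emergency", "backup", "rainy day", "safety"]):
--         return "emergency_fund"
--
--     # Vehicle keywords
--     if any(kw in text_lower for kw in ["car", "gaadi", "bike", "vehicle", "scooty"]):
--         return "car_purchase"
--
--     return None
-- ===== SOURCE B (Python) =====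
-- from typing import Optional
--
-- # Flat keyword -> priority map (0 = highest priority) and the label per priority.
-- _KEYWORD_PRIORITY = {
--     "padhai": 0, "education": 0, "college": 0, "school": 0, "bachhe": 0,
--     "bachha": 0, "beta": 0, "beti": 0, "study": 0,
--     "shadi": 1, "shaadi": 1, "wedding": 1, "marriage": 1, "vivah": 1,
--     "ghar": 2, "home": 2, "house": 2, "flat": 2, "apartment": 2,
--     "property": 2, "down payment": 2,
--     "retire": 3, "retirement": 3, "pension": 3, "budhaapa": 3, "old age": 3,
--     "emergency": 4, "backup": 4, "rainy day": 4, "safety": 4,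
--     "car": 5, "gaadi": 5, "bike": 5, "vehicle": 5, "scooty": 5,
-- }
--
-- _LABELS = ["child_education", "daughter_wedding", "home_downpayment",
--            "retirement", "emergency_fund", "car_purchase"]
--
-- def detect_goal_from_text(text: str) -> Optional[str]:
--     """Detect goal type from user's Hinglish text."""
--     text_lower = text.lower()
--     hits = [p for kw, p in _KEYWORD_PRIORITY.items() if kw in text_lower]
--     return _LABELS[min(hits)] if hits else None
-- ===== Notes on version B (the rewrite author's own statement) =====
-- stated objective: alternative
-- what changed: Instead of A's ordered cascade of six group tests with early return (and a redundant daughter/beti inner branch), B flattens all keywords into one keyword-to-priority map, collects the priorities of ALL matching keywords in a single comprehension, and selects the label of the minimum priority (no ordered short-circuit).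
import Mathlib
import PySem

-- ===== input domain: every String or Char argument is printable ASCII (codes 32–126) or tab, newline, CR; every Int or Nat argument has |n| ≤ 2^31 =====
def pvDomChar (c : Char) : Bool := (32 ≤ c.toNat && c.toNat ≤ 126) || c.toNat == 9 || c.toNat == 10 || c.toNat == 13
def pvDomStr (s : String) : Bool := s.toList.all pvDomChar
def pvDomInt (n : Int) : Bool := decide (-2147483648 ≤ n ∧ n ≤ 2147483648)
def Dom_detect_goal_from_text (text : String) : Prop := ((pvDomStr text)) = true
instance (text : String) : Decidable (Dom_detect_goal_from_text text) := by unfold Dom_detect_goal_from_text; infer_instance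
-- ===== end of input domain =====

-- B replaces A's ordered cascade of six keyword-group tests with early return by a flat
-- keyword→priority map: it collects the priorities of ALL matching keywords and returns
-- the label of the minimum priority — an alternative selection strategy, same behaviour.

-- ===== PORT A =====
def detect_goal_from_text (text : String) : Option String :=
  let text_lower := PySem.Str.lower text
  if (["padhai", "education", "college", "school", "bachhe", "bachha", "beta", "beti", "study"].any
      (fun kw => PySem.Str.isIn kw text_lower)) then
    if (["beti", "daughter", "ladki"].any (fun kw => PySem.Str.isIn kw text_lower)) then
      some "child_education"
    else
      some "child_education"
  else if (["shadi", "shaadi", "wedding", "marriage", "vivah"].any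
      (fun kw => PySem.Str.isIn kw text_lower)) then
    some "daughter_wedding"
  else if (["ghar", "home", "house", "flat", "apartment", "property", "down payment"].any
      (fun kw => PySem.Str.isIn kw text_lower)) then
    some "home_downpayment"
  else if (["retire", "retirement", "pension", "budhaapa", "old age"].any
      (fun kw => PySem.Str.isIn kw text_lower)) then
    some "retirement"
  else if (["emergency", "backup", "rainy day", "safety"].any
      (fun kw => PySem.Str.isIn kw text_lower)) then
    some "emergency_fund"
  else if (["car", "gaadi", "bike", "vehicle", "scooty"].any
      (fun kw => PySem.Str.isIn kw text_lower)) then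
    some "car_purchase"
  else
    none


-- ===== PORT B =====
-- Source B's module-level _KEYWORD_PRIORITY dict (insertion order) as an association list
def pvKwPrio : List (String × Nat) :=
  [("padhai", 0), ("education", 0), ("college", 0), ("school", 0), ("bachhe", 0),
   ("bachha", 0), ("beta", 0), ("beti", 0), ("study", 0),
   ("shadi", 1), ("shaadi", 1), ("wedding", 1), ("marriage", 1), ("vivah", 1),
   ("ghar", 2), ("home", 2), ("house", 2), ("flat", 2), ("apartment", 2),
   ("property", 2), ("down payment", 2),
   ("retire", 3), ("retirement", 3), ("pension", 3), ("budhaapa", 3), ("old age", 3),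
   ("emergency", 4), ("backup", 4), ("rainy day", 4), ("safety", 4),
   ("car", 5), ("gaadi", 5), ("bike", 5), ("vehicle", 5), ("scooty", 5)]

-- Source B's _LABELS
def pvLabels : List String :=
  ["child_education", "daughter_wedding", "home_downpayment",
   "retirement", "emergency_fund", "car_purchase"]

-- hits = [p for kw, p in _KEYWORD_PRIORITY.items() if kw in text_lower];
-- return _LABELS[min(hits)] if hits else None
def detect_goal_from_text_alt (text : String) : Option String :=
  let text_lower := PySem.Str.lower text
  let hits := (pvKwPrio.filter (fun kp => PySem.Str.isIn kp.1 text_lower)).map Prod.snd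
  match PySem.List.min? hits (fun y => y) with
  | some b => some (pvLabels.getD b "")
  | none => none


-- ===== PRECONDITION & SPEC =====
def Spec_detect_goal_from_text (text : String) (out : Option String) : Prop := out = detect_goal_from_text_alt text
instance (text : String) (out : Option String) : Decidable (Spec_detect_goal_from_text text out) := by unfold Spec_detect_goal_from_text; infer_instance

-- ===== CLAIM (what is proved, stated in full; the proofs are below) =====
def Claim_equal_detect_goal_from_text : Prop := ∀ (text : String), Dom_detect_goal_from_text text → Spec_detect_goal_from_text text (detect_goal_from_text text)

-- ===== LEMMAS AND PROOFS =====
-- the flat keyword→priority list is the six keyword groups, each paired with its priority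
theorem pv_split : pvKwPrio =
    (["padhai", "education", "college", "school", "bachhe", "bachha", "beta", "beti", "study"].map (fun kw => (kw, 0)))
    ++ ((["shadi", "shaadi", "wedding", "marriage", "vivah"].map (fun kw => (kw, 1)))
    ++ ((["ghar", "home", "house", "flat", "apartment", "property", "down payment"].map (fun kw => (kw, 2)))
    ++ ((["retire", "retirement", "pension", "budhaapa", "old age"].map (fun kw => (kw, 3)))
    ++ ((["emergency", "backup", "rainy day", "safety"].map (fun kw => (kw, 4)))
    ++ (["car", "gaadi", "bike", "vehicle", "scooty"].map (fun kw => (kw, 5))))))) := rfl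


theorem pv_contrib (t : String) (kws : List String) (k : Nat) :
    (((kws.map (fun kw => (kw, k))).filter (fun kp => PySem.Str.isIn kp.1 t)).map Prod.snd)
    = (kws.filter (fun kw => PySem.Str.isIn kw t)).map (fun _ => k) := by
  induction kws with
  | nil => rfl
  | cons x xs ih =>
    simp only [List.map_cons, List.filter_cons]
    by_cases h : PySem.Str.isIn x t = true
    · simp only [h, if_true, List.map_cons, ih]
    · simp only [Bool.not_eq_true] at h
      simp only [h, Bool.false_eq_true, if_false, ih]

theorem pv_foldl_min_const (k : Nat) : ∀ l : List Nat, (∀ y ∈ l, k ≤ y) → l.foldl min k = k := by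
  intro l
  induction l with
  | nil => intro _; rfl
  | cons x xs ih =>
    intro h
    have hx : min k x = k := Nat.min_eq_left (h x (by simp))
    simp only [List.foldl_cons, hx]
    exact ih (fun y hy => h y (by simp [hy]))

theorem pv_filter_ne_nil (t : String) (kws : List String)
    (h : kws.any (fun kw => PySem.Str.isIn kw t) = true) :
    kws.filter (fun kw => PySem.Str.isIn kw t) ≠ [] := by
  rw [List.any_eq_true] at h
  obtain ⟨x, hx, hm⟩ := h
  intro hnil
  have hmem : x ∈ kws.filter (fun kw => PySem.Str.isIn kw t) :=
    List.mem_filter.mpr ⟨hx, hm⟩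
  rw [hnil] at hmem
  exact absurd hmem (List.not_mem_nil)

theorem pv_filter_nil (t : String) (kws : List String)
    (h : ¬ kws.any (fun kw => PySem.Str.isIn kw t) = true) :
    kws.filter (fun kw => PySem.Str.isIn kw t) = [] := by
  rw [List.any_eq_true] at h
  exact List.filter_eq_nil_iff.mpr (fun a ha hm => h ⟨a, ha, hm⟩)

-- B's selection at the first matching priority level k: if the level-k filtered list is
-- nonempty and every element of the tail groups has priority ≥ k, min picks k.
theorem pv_min_at (k : Nat) (f : List String) (rest : List Nat)
    (hne : f ≠ []) (hrest : ∀ y ∈ rest, k ≤ y) :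
    PySem.List.min? (f.map (fun _ => k) ++ rest) (fun y => y) = some k := by
  obtain ⟨x, xs, rfl⟩ := List.exists_cons_of_ne_nil hne
  simp only [List.map_cons, List.cons_append]
  rw [PySem.List.min?_id_cons]
  congr 1
  apply pv_foldl_min_const
  intro y hy
  rcases List.mem_append.mp hy with h1 | h2
  · obtain ⟨_, _, rfl⟩ := List.mem_map.mp h1
    exact le_refl k
  · exact hrest y h2

theorem pv_main (text : String) : detect_goal_from_text text = detect_goal_from_text_alt text := by
  simp only [detect_goal_from_text, detect_goal_from_text_alt, pv_split,
    List.filter_append, List.map_append, pv_contrib]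
  split_ifs with h1 h2 h3 h4 h5 h6 h7
  · rw [pv_min_at 0]
    · rfl
    · exact pv_filter_ne_nil _ _ h1
    · intro y hy
      simp only [List.mem_append, List.mem_map] at hy
      rcases hy with ⟨a,_,rfl⟩|⟨a,_,rfl⟩|⟨a,_,rfl⟩|⟨a,_,rfl⟩|⟨a,_,rfl⟩ <;> omega
  · rw [pv_min_at 0]
    · rfl
    · exact pv_filter_ne_nil _ _ h1
    · intro y hy
      simp only [List.mem_append, List.mem_map] at hy
      rcases hy with ⟨a,_,rfl⟩|⟨a,_,rfl⟩|⟨a,_,rfl⟩|⟨a,_,rfl⟩|⟨a,_,rfl⟩ <;> omega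
  · rw [pv_filter_nil _ _ h1]; simp only [List.map_nil, List.nil_append]
    rw [pv_min_at 1]
    · rfl
    · exact pv_filter_ne_nil _ _ h3
    · intro y hy
      simp only [List.mem_append, List.mem_map] at hy
      rcases hy with ⟨a,_,rfl⟩|⟨a,_,rfl⟩|⟨a,_,rfl⟩|⟨a,_,rfl⟩ <;> omega
  · rw [pv_filter_nil _ _ h1]; rw [pv_filter_nil _ _ h3]; simp only [List.map_nil, List.nil_append]
    rw [pv_min_at 2]
    · rfl
    · exact pv_filter_ne_nil _ _ h4
    · intro y hy
      simp only [List.mem_append, List.mem_map] at hy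
      rcases hy with ⟨a,_,rfl⟩|⟨a,_,rfl⟩|⟨a,_,rfl⟩ <;> omega
  · rw [pv_filter_nil _ _ h1]; rw [pv_filter_nil _ _ h3]; rw [pv_filter_nil _ _ h4]; simp only [List.map_nil, List.nil_append]
    rw [pv_min_at 3]
    · rfl
    · exact pv_filter_ne_nil _ _ h5
    · intro y hy
      simp only [List.mem_append, List.mem_map] at hy
      rcases hy with ⟨a,_,rfl⟩|⟨a,_,rfl⟩ <;> omega
  · rw [pv_filter_nil _ _ h1]; rw [pv_filter_nil _ _ h3]; rw [pv_filter_nil _ _ h4]; rw [pv_filter_nil _ _ h5]; simp only [List.map_nil, List.nil_append]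
    rw [pv_min_at 4]
    · rfl
    · exact pv_filter_ne_nil _ _ h6
    · intro y hy
      simp only [List.mem_map] at hy
      rcases hy with ⟨a, _, rfl⟩
      omega
  · rw [pv_filter_nil _ _ h1]; rw [pv_filter_nil _ _ h3]; rw [pv_filter_nil _ _ h4]; rw [pv_filter_nil _ _ h5]; rw [pv_filter_nil _ _ h6]; simp only [List.map_nil, List.nil_append]
    rw [← List.append_nil (List.map (fun _ => 5) (List.filter (fun kw => PySem.Str.isIn kw (PySem.Str.lower text)) ["car", "gaadi", "bike", "vehicle", "scooty"]))]
    rw [pv_min_at 5]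
    · rfl
    · exact pv_filter_ne_nil _ _ h7
    · intro y hy; simp only [List.not_mem_nil] at hy
  · rw [pv_filter_nil _ _ h1, pv_filter_nil _ _ h3, pv_filter_nil _ _ h4,
        pv_filter_nil _ _ h5, pv_filter_nil _ _ h6, pv_filter_nil _ _ h7]
    rfl

-- ===== VERDICT (by name: the statement is the Claim_ definition above) =====
theorem detect_goal_from_text_spec : Claim_equal_detect_goal_from_text := by
  intro text _
  exact pv_main text
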